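-- pv_equiv track=rewrite | github.com/tb-tian/icpr26lrlpr | infer_new.py | _pick_3_indices
-- ===== SOURCE A (Python) =====
-- def _pick_3_indices(centre: int, total: int) -> list[int]:
--     """
--     Pick 3 frame indices for MTA input, centred on `centre`.
--     Always includes `centre`; tries to pick one before and one after.
--     """
--     if total == 1:
--         return [0, 0, 0]
--     if total == 2:
--         other = 1 - centre
--         return sorted([centre, centre, other])
--
--     # total >= 3 — pick centre, one before, one after
--     before = centre - 1 if centre > 0 else centre + 1
--     after = centre + 1 if centre < total - 1 else centre - 1
--     # Ensure 3 unique if possible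
--     indices = list({before, centre, after})
--     while len(indices) < 3:
--         indices.append(centre)
--     return sorted(indices)
-- ===== SOURCE B (Python) =====
-- def _pick_3_indices(centre: int, total: int) -> list[int]:
--     """Pick 3 frame indices centred on `centre` (branch-arithmetic form, no set/sort)."""
--     if total == 1:
--         return [0, 0, 0]
--     if total == 2:
--         other = 1 - centre
--         return [other, centre, centre] if centre >= 1 else [centre, centre, other]
--     # total >= 3 (or total <= 0): neighbours clamp to the same side exactly when
--     # the two boundary tests agree
--     at_left = centre <= 0
--     at_right = centre >= total - 1
--     if at_left == at_right:
--         return [centre - 1, centre, centre + 1]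
--     if at_left:
--         return [centre, centre, centre + 1]
--     return [centre - 1, centre, centre]
-- ===== Notes on version B (the rewrite author's own statement) =====
-- stated objective: simpler
-- what changed: Replaces the set-based dedup plus pad-while plus sort of A's total>=3 branch (and the sorted() in the total==2 branch) with a direct case split on the boundary conditions that returns the already-sorted triple literally.
import Mathlib
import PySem

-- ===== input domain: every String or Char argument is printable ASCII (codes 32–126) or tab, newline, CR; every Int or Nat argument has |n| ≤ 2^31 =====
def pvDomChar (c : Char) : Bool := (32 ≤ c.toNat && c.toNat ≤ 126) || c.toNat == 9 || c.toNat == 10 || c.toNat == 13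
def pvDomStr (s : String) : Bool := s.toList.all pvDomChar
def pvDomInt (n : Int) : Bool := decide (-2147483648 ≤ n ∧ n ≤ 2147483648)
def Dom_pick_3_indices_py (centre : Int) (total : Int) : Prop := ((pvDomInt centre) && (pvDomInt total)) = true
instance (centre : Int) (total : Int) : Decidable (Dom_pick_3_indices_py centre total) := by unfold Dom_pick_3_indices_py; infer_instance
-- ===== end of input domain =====

-- B replaces A's set-dedup + pad-while + sort by a direct case split returning the already-sorted triple (objective: simpler; no speed claim).

-- ===== PORT A =====
-- while len(indices) < 3: indices.append(centre)
def pvPadWhile (centre : Int) (indices : List Int) : List Int :=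
  if indices.length < 3 then pvPadWhile centre (indices ++ [centre]) else indices
termination_by 3 - indices.length
decreasing_by simp; omega

def pick_3_indices_py (centre : Int) (total : Int) : List Int :=
  if total == 1 then [0, 0, 0]
  else if total == 2 then
    let other := 1 - centre
    PySem.List.sorted [centre, centre, other] (fun x => x) false
  else
    let before := if centre > 0 then centre - 1 else centre + 1
    let after := if centre < total - 1 then centre + 1 else centre - 1
    -- list({before, centre, after}): consumed only by sorted (injective key), so set order is immaterial
    let indices := PySem.Set.ofList [before, centre, after]
    PySem.List.sorted (pvPadWhile centre indices) (fun x => x) false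

-- ===== PORT B =====
def pick_3_indices_py_alt (centre : Int) (total : Int) : List Int :=
  if total == 1 then [0, 0, 0]
  else if total == 2 then
    let other := 1 - centre
    if centre ≥ 1 then [other, centre, centre] else [centre, centre, other]
  else
    let atLeft := centre ≤ 0
    let atRight := centre ≥ total - 1
    if (decide atLeft) = (decide atRight) then [centre - 1, centre, centre + 1]
    else if atLeft then [centre, centre, centre + 1]
    else [centre - 1, centre, centre]

-- ===== PRECONDITION & SPEC =====
def Spec_pick_3_indices_py (centre : Int) (total : Int) (out : List Int) : Prop := out = pick_3_indices_py_alt centre total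
instance (centre : Int) (total : Int) (out : List Int) : Decidable (Spec_pick_3_indices_py centre total out) := by unfold Spec_pick_3_indices_py; infer_instance

-- ===== CLAIM (what is proved, stated in full; the proofs are below) =====
def Claim_equal_pick_3_indices_py : Prop := ∀ (centre : Int) (total : Int), Dom_pick_3_indices_py centre total → Spec_pick_3_indices_py centre total (pick_3_indices_py centre total)

-- ===== LEMMAS AND PROOFS =====

theorem pvPerm_abb (a b : Int) : List.Perm [a, b, b] [b, b, a] :=
  (List.Perm.swap b a [b]).trans (List.Perm.cons b (List.Perm.swap b a []))

theorem pvPerm_rev3 (a b c : Int) : List.Perm [a, b, c] [c, b, a] :=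
  ((List.Perm.swap b a [c]).trans (List.Perm.cons b (List.Perm.swap c a []))).trans
    (List.Perm.swap c b [a])

theorem pick3_eq (centre total : Int) :
    pick_3_indices_py centre total = pick_3_indices_py_alt centre total := by
  unfold pick_3_indices_py pick_3_indices_py_alt
  by_cases h1 : total = 1
  · simp [h1]
  by_cases h2 : total = 2
  · simp only [h2, beq_iff_eq, if_true, if_false, OfNat.ofNat_ne_one]
    by_cases hc : centre ≥ 1
    · rw [PySem.List.sorted_id_eq_of_perm_of_pairwise
        _ [1 - centre, centre, centre] (pvPerm_abb (1 - centre) centre)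
        (by simp; omega)]
      simp [hc]
    · rw [PySem.List.sorted_id_eq_of_perm_of_pairwise
        _ [centre, centre, 1 - centre] (List.Perm.refl _) (by simp; omega)]
      simp [hc]
  · simp only [h1, h2, beq_iff_eq, if_false]
    by_cases hl : centre ≤ 0 <;> by_cases hr : centre ≥ total - 1
    · -- at both boundaries: before = centre+1, after = centre-1, all distinct
      have hb : ¬ centre > 0 := by omega
      have ha : ¬ centre < total - 1 := by omega
      have e1 : ¬ (centre = centre + 1) := by omega
      have e2 : ¬ (centre - 1 = centre + 1) := by omega
      have e3 : ¬ (centre - 1 = centre) := by omega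
      simp only [hb, ha, hl, hr, if_false, decide_true, if_true]
      rw [show PySem.Set.ofList [centre + 1, centre, centre - 1]
            = [centre + 1, centre, centre - 1] by
        simp [PySem.Set.ofList, PySem.Set.add, PySem.Set.contains, e1, e2, e3]]
      rw [show pvPadWhile centre [centre + 1, centre, centre - 1]
            = [centre + 1, centre, centre - 1] by rw [pvPadWhile]; simp]
      rw [PySem.List.sorted_id_eq_of_perm_of_pairwise
        _ [centre - 1, centre, centre + 1]
        (pvPerm_rev3 (centre + 1) centre (centre - 1)).symm (by simp; omega)]
    · -- left boundary only: before = after = centre+1, pad with centre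
      have hb : ¬ centre > 0 := by omega
      have ha : centre < total - 1 := by omega
      have e1 : ¬ (centre = centre + 1) := by omega
      simp only [hb, ha, if_false, if_true]
      rw [show PySem.Set.ofList [centre + 1, centre, centre + 1]
            = [centre + 1, centre] by
        simp [PySem.Set.ofList, PySem.Set.add, PySem.Set.contains, e1]]
      rw [show pvPadWhile centre [centre + 1, centre]
            = [centre + 1, centre, centre] by rw [pvPadWhile]; simp [pvPadWhile]]
      rw [PySem.List.sorted_id_eq_of_perm_of_pairwise
        _ [centre, centre, centre + 1]
        (pvPerm_abb (centre + 1) centre).symm (by simp)]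
      simp only [hl, hr, decide_true, decide_false, if_false, reduceCtorEq, if_true, decide_true]
    · -- right boundary only: before = after = centre-1, pad with centre
      have hb : centre > 0 := by omega
      have ha : ¬ centre < total - 1 := by omega
      have e3 : ¬ (centre - 1 = centre) := by omega
      have e1 : ¬ (centre = centre - 1) := by omega
      simp only [hb, ha, if_false, if_true]
      rw [show PySem.Set.ofList [centre - 1, centre, centre - 1]
            = [centre - 1, centre] by
        simp [PySem.Set.ofList, PySem.Set.add, PySem.Set.contains, e1, e3]]
      rw [show pvPadWhile centre [centre - 1, centre]
            = [centre - 1, centre, centre] by rw [pvPadWhile]; simp [pvPadWhile]]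
      rw [PySem.List.sorted_id_eq_of_perm_of_pairwise
        _ [centre - 1, centre, centre] (List.Perm.refl _) (by simp)]
      simp only [hl, hr, decide_true, decide_false, if_false, reduceCtorEq]
    · -- interior: before = centre-1, after = centre+1
      have hb : centre > 0 := by omega
      have ha : centre < total - 1 := by omega
      have e1 : ¬ (centre = centre - 1) := by omega
      have e2 : ¬ (centre + 1 = centre - 1) := by omega
      have e3 : ¬ (centre + 1 = centre) := by omega
      simp only [hb, ha, if_true]
      rw [show PySem.Set.ofList [centre - 1, centre, centre + 1]
            = [centre - 1, centre, centre + 1] by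
        simp [PySem.Set.ofList, PySem.Set.add, PySem.Set.contains, e1, e2, e3]]
      rw [show pvPadWhile centre [centre - 1, centre, centre + 1]
            = [centre - 1, centre, centre + 1] by rw [pvPadWhile]; simp]
      rw [PySem.List.sorted_id_eq_of_perm_of_pairwise
        _ [centre - 1, centre, centre + 1] (List.Perm.refl _) (by simp; omega)]
      simp only [hl, hr, decide_false, if_true, if_false]

-- ===== VERDICT (by name: the statement is the Claim_ definition above) =====
theorem pick_3_indices_py_spec : Claim_equal_pick_3_indices_py := by
  intro centre total _
  exact pick3_eq centre total
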